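-- pv_equiv track=rewrite | github.com/Ohjinn/algo-py | programmers/level2/2개이하로다른비트.py | solution
-- ===== SOURCE A (Python) =====
-- def solution(numbers):
--     answer = []
--
--     for number in numbers:
--         bin_number = list('0' + format(number, 'b'))
--         zero_location = ''.join(bin_number).rfind('0')
--         bin_number[zero_location] = '1'
--
--         if number % 2 == 1:
--             bin_number[zero_location + 1] = '0'
--
--         answer.append(int(''.join(bin_number), 2))
--
--     return answer
-- ===== SOURCE B (Python) =====
-- def solution(numbers):
--     # Arithmetic recursion instead of binary-string surgery:
--     # nxt(n) = n+1 for even n; for odd n = 2m+1, nxt(n) = 2*nxt(m) + m%2.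
--     def nxt(n):
--         if n % 2 == 0:
--             return n + 1
--         m = n // 2
--         return 2 * nxt(m) + m % 2
--     return [nxt(n) for n in numbers]
-- ===== Notes on version B (the rewrite author's own statement) =====
-- stated objective: simpler
-- what changed: Replaces A's binary-string surgery (build '0'+format(n,'b'), rfind the last '0', patch characters, re-parse with int(_,2)) by a short arithmetic recursion on the number itself: nxt(n)=n+1 for even n, nxt(2m+1)=2*nxt(m)+m%2.
-- outside the precondition, e.g. on solution([-3]): A returns [11], B returns [-2]; on solution([-2]): A raises ValueError, B returns [-1]; on solution([-1]): A returns [5], B raises RecursionError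
import Mathlib
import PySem

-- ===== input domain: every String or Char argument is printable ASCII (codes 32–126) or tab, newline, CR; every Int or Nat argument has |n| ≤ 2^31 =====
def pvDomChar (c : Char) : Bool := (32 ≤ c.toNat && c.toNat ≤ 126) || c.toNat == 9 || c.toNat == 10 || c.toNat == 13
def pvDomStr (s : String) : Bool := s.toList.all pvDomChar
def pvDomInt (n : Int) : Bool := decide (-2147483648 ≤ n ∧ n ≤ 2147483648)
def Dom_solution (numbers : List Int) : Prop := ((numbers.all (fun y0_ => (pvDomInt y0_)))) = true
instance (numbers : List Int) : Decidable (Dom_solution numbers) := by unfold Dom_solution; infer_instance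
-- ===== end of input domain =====

-- B replaces A's binary-string surgery (format/rfind/int(_,2)) by a small arithmetic recursion on the number itself.

-- ===== PORT A =====

-- format(m, 'b') for a natural number m (most significant digit first)
def binChars (m : Nat) : List Char :=
  if m < 2 then [if m = 1 then '1' else '0']
  else binChars (m / 2) ++ [if m % 2 = 1 then '1' else '0']
decreasing_by exact Nat.div_lt_self (by omega) (by omega)

-- str.rfind(c): index of the LAST occurrence, -1 if absent
def rfindChar (cs : List Char) (c : Char) : Int :=
  match cs with
  | [] => -1
  | x :: xs =>
      let r := rfindChar xs c
      if 0 ≤ r then r + 1 else if x = c then 0 else -1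

-- int(''.join(cs), 2): none = ValueError
def pbVal (cs : List Char) : Int :=
  cs.foldl (fun a c => 2 * a + (if c = '1' then 1 else 0)) 0
def parseBin (cs : List Char) : Option Int :=
  if cs ≠ [] ∧ cs.all (fun c => c = '0' || c = '1') then some (pbVal cs) else none

-- the loop body of A: one `number` to its appended value
def fA (number : Int) : Int :=
  let bin0 : List Char :=
    '0' :: (if number < 0 then '-' :: binChars (-number).toNat else binChars number.toNat)
  let z := rfindChar bin0 '0'
  let b1 := bin0.set z.toNat '1'
  let b2 := if PySem.Int.mod number 2 = 1 then b1.set (z.toNat + 1) '0' else b1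
  match parseBin b2 with
  | some v => v
  | none => 0   -- Python raises ValueError here; unreachable under Pre_solution

def solution (numbers : List Int) : List Int :=
  numbers.foldl (fun answer number => answer ++ [fA number]) []

-- ===== PORT B =====

-- Source B's nxt, with a fuel parameter only to make the recursion total in Lean;
-- fuel natAbs+1 is never exhausted on the inputs where the Python B returns.
def nxtFuel : Nat → Int → Int
  | 0, _ => 0
  | f + 1, n =>
      if PySem.Int.mod n 2 = 0 then n + 1
      else
        let m := PySem.Int.floordiv n 2
        2 * nxtFuel f m + PySem.Int.mod m 2

def solution_alt (numbers : List Int) : List Int :=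
  numbers.map (fun n => nxtFuel (n.natAbs + 1) n)

-- ===== PRECONDITION & SPEC =====
-- Pre_ restricts to the problem's natural domain of non-negative numbers: on a negative even
-- element A raises ValueError, and on negative odd elements A's value (from overwriting the
-- '-' sign character) is an accident no caller could want; cites in claim.json.
def Pre_solution (numbers : List Int) : Prop := ∀ x ∈ numbers, 0 ≤ x
instance (numbers : List Int) : Decidable (Pre_solution numbers) := by
  unfold Pre_solution; infer_instance
def pvWitness_solution : List Int := [0, 1, 2, 3, 6, 7, 12]

def Spec_solution (numbers : List Int) (out : List Int) : Prop := out = solution_alt numbers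
instance (numbers : List Int) (out : List Int) : Decidable (Spec_solution numbers out) := by unfold Spec_solution; infer_instance

-- ===== CLAIM (what is proved, stated in full; the proofs are below) =====
def Claim_equal_solution : Prop := ∀ (numbers : List Int), Dom_solution numbers → Pre_solution numbers → Spec_solution numbers (solution numbers)

-- ===== LEMMAS AND PROOFS =====

def bitC (c : Char) : Int := if c = '1' then 1 else 0

theorem pbVal_snoc (u : List Char) (c : Char) :
    pbVal (u ++ [c]) = 2 * pbVal u + bitC c := by
  simp [pbVal, List.foldl_append, List.foldl, bitC]

theorem pbVal_cons_zero (v : List Char) : pbVal ('0' :: v) = pbVal v := by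
  simp [pbVal, List.foldl]

theorem pbVal_binChars (m : Nat) : pbVal (binChars m) = (m : Int) := by
  fun_induction binChars m with
  | case1 m h => interval_cases m <;> simp [pbVal, List.foldl]
  | case2 m h ih =>
      rw [pbVal_snoc, ih]
      rcases Nat.even_or_odd m with he | ho
      · have h2 : m % 2 = 0 := Nat.even_iff.mp he
        simp [h2, bitC]
        exact_mod_cast congrArg (Nat.cast : Nat → Int) (by omega : 2 * (m / 2) = m)
      · have h2 : m % 2 = 1 := Nat.odd_iff.mp ho
        simp [h2, bitC]
        exact_mod_cast congrArg (Nat.cast : Nat → Int) (by omega : 2 * (m / 2) + 1 = m)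

-- rfind basics
theorem rfind_nonneg_iff (cs : List Char) (c : Char) :
    0 ≤ rfindChar cs c ↔ c ∈ cs := by
  induction cs with
  | nil => simp [rfindChar]
  | cons x xs ih =>
      simp only [rfindChar, List.mem_cons]
      split_ifs with h1 h2
      · constructor
        · intro _; right; exact ih.mp h1
        · intro _; omega
      · simp [h2]
      · constructor
        · intro h; omega
        · rintro (h | h)
          · exact absurd h.symm h2
          · exact absurd (ih.mpr h) h1

theorem rfind_lt_length (cs : List Char) (c : Char) :
    rfindChar cs c < cs.length := by
  induction cs with
  | nil => simp [rfindChar]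
  | cons x xs ih =>
      simp only [rfindChar, List.length_cons]
      split_ifs <;> push_cast <;> omega

theorem rfind_snoc_eq (u : List Char) (c : Char) :
    rfindChar (u ++ [c]) c = (u.length : Int) := by
  induction u with
  | nil => simp [rfindChar]
  | cons x xs ih =>
      have h : 0 ≤ rfindChar (xs ++ [c]) c := by rw [rfind_nonneg_iff]; simp
      simp [rfindChar, ih]

theorem rfind_snoc_ne (u : List Char) (b c : Char) (hb : b ≠ c) (h : c ∈ u) :
    rfindChar (u ++ [b]) c = rfindChar u c := by
  induction u with
  | nil => simp at h
  | cons x xs ih =>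
      by_cases hm : c ∈ xs
      · have h1 : 0 ≤ rfindChar (xs ++ [b]) c := by
          rw [rfind_nonneg_iff]; simp [hm]
        have h2 : 0 ≤ rfindChar xs c := (rfind_nonneg_iff _ _).mpr hm
        simp [rfindChar, ih hm, h2]
      · have hx : x = c := by rcases List.mem_cons.mp h with h' | h' <;> tauto
        have h2 : ¬ 0 ≤ rfindChar xs c := by
          rw [rfind_nonneg_iff]; exact hm
        have h1 : ¬ 0 ≤ rfindChar (xs ++ [b]) c := by
          rw [rfind_nonneg_iff]; simp [hm, Ne.symm hb]
        simp [rfindChar, h1, h2, hx]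

-- set lemmas
theorem set_append_left' (u v : List Char) (i : Nat) (h : i < u.length) (c : Char) :
    (u ++ v).set i c = u.set i c ++ v := by
  rw [List.set_append]; simp [Nat.not_le.mpr h]

theorem set_append_boundary (u v : List Char) (c d : Char) :
    (u ++ d :: v).set u.length c = u ++ c :: v := by
  rw [List.set_append]; simp

-- bits preserved by set
theorem all_bits_set (l : List Char) (i : Nat) (c : Char)
    (hl : l.all (fun c => c = '0' || c = '1') = true) (hc : c = '0' ∨ c = '1') :
    (l.set i c).all (fun c => c = '0' || c = '1') = true := by
  simp only [List.all_eq_true] at *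
  intro x hx
  rcases List.mem_or_eq_of_mem_set hx with h | h
  · exact hl x h
  · subst h; rcases hc with h | h <;> simp [h]

theorem all_bits_binChars (m : Nat) :
    (binChars m).all (fun c => c = '0' || c = '1') = true := by
  fun_induction binChars m with
  | case1 m h => split <;> simp
  | case2 m h ih => simp only [List.all_append, ih, Bool.true_and]; split <;> simp

-- the pure transformation A performs on the digit list
def transform (cs : List Char) (odd : Bool) : List Char :=
  let z := (rfindChar cs '0').toNat
  let b1 := cs.set z '1'
  if odd then b1.set (z + 1) '0' else b1

theorem parseBin_some (cs : List Char) (h1 : cs ≠ [])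
    (h2 : cs.all (fun c => c = '0' || c = '1') = true) :
    parseBin cs = some (pbVal cs) := by
  simp [parseBin, h1, h2]

theorem fA_nat (m : Nat) :
    fA (m : Int) = pbVal (transform ('0' :: binChars m) (decide (m % 2 = 1))) := by
  have hnn : ¬ ((m : Int) < 0) := by omega
  have hbits : ('0' :: binChars m).all (fun c => c = '0' || c = '1') = true := by
    simp [all_bits_binChars]
  have hmod : PySem.Int.mod (m : Int) 2 = ((m % 2 : Nat) : Int) := by
    rw [PySem.Int.mod_eq_emod_of_pos (by omega)]; push_cast; omega
  by_cases hm : m % 2 = 1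
  · have hc : PySem.Int.mod (m : Int) 2 = 1 := by rw [hmod, hm]; rfl
    simp only [fA, Int.toNat_natCast, if_neg hnn, hc, if_pos]
    simp only [transform, hm, decide_true, if_true]
    rw [parseBin_some _ (by simp)
      (all_bits_set _ _ _ (all_bits_set _ _ _ hbits (Or.inr rfl)) (Or.inl rfl))]
  · have hc : ¬ PySem.Int.mod (m : Int) 2 = 1 := by rw [hmod]; omega
    simp only [fA, Int.toNat_natCast, if_neg hnn, if_neg hc]
    simp only [transform, hm, decide_false, Bool.false_eq_true, if_false]
    rw [parseBin_some _ (by simp) (all_bits_set _ _ _ hbits (Or.inr rfl))]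

theorem transform_snoc_zero (u : List Char) :
    transform (u ++ ['0']) false = u ++ ['1'] := by
  simp only [transform, rfind_snoc_eq, Int.toNat_natCast, Bool.false_eq_true, if_false]
  exact set_append_boundary u [] '1' '0'

theorem transform_odd_even_tail (u : List Char) :
    transform ((u ++ ['0']) ++ ['1']) true = (u ++ ['1']) ++ ['0'] := by
  have hz : rfindChar ((u ++ ['0']) ++ ['1']) '0' = (u.length : Int) := by
    rw [rfind_snoc_ne _ _ _ (by decide) (by simp), rfind_snoc_eq]
  simp only [transform, hz, Int.toNat_natCast, if_true]
  rw [List.append_assoc, List.cons_append, set_append_boundary]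
  have h2 : (u ++ '1' :: '1' :: []).set (u.length + 1) '0' = u ++ '1' :: '0' :: [] := by
    have := set_append_boundary (u ++ ['1']) [] '0' '1'
    simpa [List.append_assoc] using this
  simpa [List.append_assoc] using h2

theorem transform_odd_odd_tail (u : List Char) (h0 : '0' ∈ u) :
    transform ((u ++ ['1']) ++ ['1']) true = (transform (u ++ ['1']) true) ++ ['1'] := by
  have hz1 : rfindChar (u ++ ['1']) '0' = rfindChar u '0' :=
    rfind_snoc_ne _ _ _ (by decide) h0
  have hz2 : rfindChar ((u ++ ['1']) ++ ['1']) '0' = rfindChar u '0' := by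
    rw [rfind_snoc_ne _ _ _ (by decide) (by simp [h0]), hz1]
  have hnn : 0 ≤ rfindChar u '0' := (rfind_nonneg_iff _ _).mpr h0
  have hlt : rfindChar u '0' < (u.length : Int) := rfind_lt_length u '0'
  set z := (rfindChar u '0').toNat with hzdef
  have hzlt : z < u.length := by omega
  simp only [transform, hz1, hz2, ← hzdef, if_true]
  rw [set_append_left' (u ++ ['1']) ['1'] z (by simp; omega) '1',
      set_append_left' ((u ++ ['1']).set z '1') ['1'] (z + 1) (by simp; omega) '0']

-- decompositions of the digit string
theorem even_decomp (m : Nat) (hm : m % 2 = 0) :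
    ∃ u, '0' :: binChars m = u ++ ['0'] := by
  by_cases h : m < 2
  · have h0 : m = 0 := by omega
    exact ⟨['0'], by simp [h0, binChars]⟩
  · refine ⟨'0' :: binChars (m / 2), ?_⟩
    rw [binChars]; simp [h, hm]

theorem odd_snoc (j : Nat) (hj : j % 2 = 1) :
    ∃ u, '0' :: binChars j = u ++ ['1'] ∧ '0' ∈ u := by
  by_cases h : j < 2
  · have h1 : j = 1 := by omega
    exact ⟨['0'], by simp [h1, binChars]⟩
  · refine ⟨'0' :: binChars (j / 2), ?_, by simp⟩
    rw [binChars]; simp [h, hj]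

theorem odd_decomp (j : Nat) (hj : 1 ≤ j) :
    '0' :: binChars (2 * j + 1) = ('0' :: binChars j) ++ ['1'] := by
  rw [binChars]
  have h2 : ¬ 2 * j + 1 < 2 := by omega
  have h3 : (2 * j + 1) / 2 = j := by omega
  have h4 : (2 * j + 1) % 2 = 1 := by omega
  simp [h2, h3, h4]

-- A's loop body satisfies B's recursion
theorem fA_even (m : Nat) (hm : m % 2 = 0) : fA (m : Int) = (m : Int) + 1 := by
  obtain ⟨u, hu⟩ := even_decomp m hm
  have hd : (decide (m % 2 = 1)) = false := by simp [hm]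
  have hval : pbVal (u ++ ['0']) = (m : Int) := by
    rw [← hu, pbVal_cons_zero, pbVal_binChars]
  rw [fA_nat, hu, hd, transform_snoc_zero, pbVal_snoc]
  rw [pbVal_snoc] at hval
  simp only [bitC] at *
  norm_num at *
  omega

theorem fA_odd (j : Nat) :
    fA ((2 * j + 1 : Nat) : Int) = 2 * fA (j : Int) + ((j % 2 : Nat) : Int) := by
  by_cases hj0 : j = 0
  · subst hj0
    have hb1 : binChars 1 = ['1'] := by rw [binChars]; norm_num
    have e1 : fA ((2 * 0 + 1 : Nat) : Int) = 2 := by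
      rw [fA_nat]
      norm_num [hb1]
      decide
    have e0 : fA ((0 : Nat) : Int) = 1 := by rw [fA_even 0 rfl]; norm_num
    rw [e1, e0]; norm_num
  have hmod : decide ((2 * j + 1) % 2 = 1) = true := by
    rw [decide_eq_true_eq]; omega
  rw [fA_nat, fA_nat, odd_decomp j (by omega), hmod]
  rcases Nat.even_or_odd j with he | ho
  · have hj : j % 2 = 0 := Nat.even_iff.mp he
    obtain ⟨u, hu⟩ := even_decomp j hj
    rw [hu, show (decide (j % 2 = 1)) = false by simp [hj],
        transform_odd_even_tail, transform_snoc_zero, pbVal_snoc, pbVal_snoc]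
    simp [bitC, hj]
  · have hj : j % 2 = 1 := Nat.odd_iff.mp ho
    obtain ⟨u, hu, h0⟩ := odd_snoc j hj
    rw [hu, show (decide (j % 2 = 1)) = true by simp [hj],
        transform_odd_odd_tail u h0, pbVal_snoc]
    simp [bitC, hj]

theorem fA_eq_nxtFuel (m : Nat) : ∀ f, m < f → fA (m : Int) = nxtFuel f (m : Int) := by
  induction m using Nat.strong_induction_on with
  | _ m ih =>
      intro f hf
      obtain ⟨f, rfl⟩ : ∃ f', f = f' + 1 := ⟨f - 1, by omega⟩
      rcases Nat.even_or_odd m with he | ho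
      · have hm : m % 2 = 0 := Nat.even_iff.mp he
        have hmod0 : PySem.Int.mod (m : Int) 2 = 0 := by
          rw [PySem.Int.mod_eq_emod_of_pos (by omega)]; omega
        rw [fA_even m hm]
        simp only [nxtFuel, hmod0, if_pos]
      · have hm : m % 2 = 1 := Nat.odd_iff.mp ho
        obtain ⟨j, rfl⟩ : ∃ j, m = 2 * j + 1 := ⟨m / 2, by omega⟩
        have h1 : PySem.Int.mod ((2 * j + 1 : Nat) : Int) 2 = 1 := by
          rw [PySem.Int.mod_eq_emod_of_pos (by omega)]; push_cast; omega
        have h2 : PySem.Int.floordiv ((2 * j + 1 : Nat) : Int) 2 = (j : Int) := by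
          rw [PySem.Int.floordiv_eq_ediv_of_pos (by omega)]; push_cast; omega
        have h3 : PySem.Int.mod (j : Int) 2 = ((j % 2 : Nat) : Int) := by
          rw [PySem.Int.mod_eq_emod_of_pos (by omega)]; push_cast; omega
        have hne : ¬ PySem.Int.mod ((2 * j + 1 : Nat) : Int) 2 = 0 := by rw [h1]; omega
        rw [fA_odd j, nxtFuel.eq_def]
        simp only [if_neg hne, h2, h3]
        rw [ih j (by omega) f (by omega)]

theorem solution_foldl (acc : List Int) (l : List Int) :
    l.foldl (fun answer number => answer ++ [fA number]) acc = acc ++ l.map fA := by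
  induction l generalizing acc with
  | nil => simp
  | cons x xs ih => simp [List.foldl, ih, List.append_assoc]

-- ===== VERDICT (by name: the statement is the Claim_ definition above) =====
theorem solution_spec : Claim_equal_solution := by
  intro numbers _ hpre
  unfold Spec_solution solution solution_alt
  rw [solution_foldl]
  simp only [List.nil_append]
  apply List.map_congr_left
  intro n hn
  have h0 : 0 ≤ n := hpre n hn
  obtain ⟨m, rfl⟩ : ∃ m : Nat, n = (m : Int) := ⟨n.toNat, by omega⟩
  have hab : ((m : Int)).natAbs = m := by omega
  rw [hab, fA_eq_nxtFuel m (m + 1) (by omega)]
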